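-- pv_equiv track=rewrite | github.com/aafandi/SymmetricGroup | symmetricgroup.py | dictionary_of_cycle_types
-- ===== SOURCE A (Python) =====
-- def cycle_type(n, list_of_cycles):
--     ### Takes a permutation in S_n in cycle notation ###
--     ### and returns its cycle type.                  ###
--
--     if list_of_cycles == [[]]:
--         return [1 for _ in range(n)]
--     else:
--         output = []
--         non_trivial = 0
--         for cycle in list_of_cycles:
--             output.append(len(cycle))
--             non_trivial += len(cycle)
--         return output + [1 for _ in range(n - non_trivial)]
--
-- def dictionary_of_cycle_types(n, list_of_permutations):
--     ### Takes a list of permutations and returns ###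
--     ### the dictionary {cycle_type:[perms]}      ###
--
--     output = {}
--
--     for perm in list_of_permutations:
--         if tuple(cycle_type(n, perm)) in output:
--             output[tuple(cycle_type(n, perm))].append(perm)
--         else:
--             output[tuple(cycle_type(n, perm))] = [perm]
--
--     return output
-- ===== SOURCE B (Python) =====
-- def cycle_type(n, list_of_cycles):
--     if list_of_cycles == [[]]:
--         return [1 for _ in range(n)]
--     else:
--         output = []
--         non_trivial = 0
--         for cycle in list_of_cycles:
--             output.append(len(cycle))
--             non_trivial += len(cycle)
--         return output + [1 for _ in range(n - non_trivial)]
--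
-- def dictionary_of_cycle_types(n, list_of_permutations):
--     # Two-pass group-by: compute each key once, dedup keys in first-occurrence
--     # order, then collect each group with a per-key filter.
--     keyed = [(tuple(cycle_type(n, p)), p) for p in list_of_permutations]
--     keys = dict.fromkeys(t for t, _ in keyed)
--     return {k: [p for t, p in keyed if t == k] for k in keys}
-- ===== Notes on version B (the rewrite author's own statement) =====
-- stated objective: alternative
-- what changed: A accumulates a dict in one pass, appending each permutation to its cycle-type bucket as it goes; B computes every key once up front, dedups the keys in first-occurrence order, and builds each group with a per-key filter over the keyed list.
import Mathlib
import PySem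

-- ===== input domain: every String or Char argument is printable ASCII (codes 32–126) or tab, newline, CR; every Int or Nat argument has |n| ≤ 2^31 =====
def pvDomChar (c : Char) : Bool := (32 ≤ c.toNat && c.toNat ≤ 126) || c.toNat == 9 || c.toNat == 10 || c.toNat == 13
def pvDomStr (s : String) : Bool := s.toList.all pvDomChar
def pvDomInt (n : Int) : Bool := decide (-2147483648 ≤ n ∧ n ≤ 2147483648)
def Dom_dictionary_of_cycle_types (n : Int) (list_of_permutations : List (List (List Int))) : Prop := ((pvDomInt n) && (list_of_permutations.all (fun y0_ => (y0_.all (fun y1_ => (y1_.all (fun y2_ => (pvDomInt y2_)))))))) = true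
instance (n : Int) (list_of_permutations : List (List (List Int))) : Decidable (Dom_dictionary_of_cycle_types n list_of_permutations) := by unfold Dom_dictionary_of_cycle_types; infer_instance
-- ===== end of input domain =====

-- B replaces A's one-pass dict-accumulate with a two-pass group-by (keys computed
-- once, deduped in first-occurrence order, groups collected by a per-key filter);
-- objective: alternative decomposition, same results.

-- shared module helper cycle_type (identical in Source A and Source B)
def cycleType (n : Int) (list_of_cycles : List (List Int)) : List Int :=
  if list_of_cycles == [[]] then
    (PySem.List.pyRange 0 n 1).map (fun _ => (1 : Int))
  else
    let st := list_of_cycles.foldl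
      (fun (acc : List Int × Int) cycle => (acc.1 ++ [(cycle.length : Int)], acc.2 + (cycle.length : Int)))
      ([], 0)
    st.1 ++ (PySem.List.pyRange 0 (n - st.2) 1).map (fun _ => (1 : Int))

-- ===== PORT A =====
def dictionary_of_cycle_types (n : Int) (list_of_permutations : List (List (List Int))) : List (List Int × List (List (List Int))) :=
  (list_of_permutations.foldl
    (fun (output : PySem.Dict (List Int) (List (List (List Int)))) perm =>
      if output.contains (cycleType n perm) then
        output.modify (cycleType n perm) [] (fun l => l ++ [perm])
      else
        output.insert (cycleType n perm) [perm])
    PySem.Dict.empty).items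

-- ===== PORT B =====
def dictionary_of_cycle_types_alt (n : Int) (list_of_permutations : List (List (List Int))) : List (List Int × List (List (List Int))) :=
  let keyed := list_of_permutations.map (fun p => (cycleType n p, p))
  let keys := PySem.List.dedup (keyed.map (·.1))
  keys.map (fun k => (k, (keyed.filter (fun q => q.1 == k)).map (·.2)))

-- ===== PRECONDITION & SPEC =====
def Spec_dictionary_of_cycle_types (n : Int) (list_of_permutations : List (List (List Int))) (out : List (List Int × List (List (List Int)))) : Prop := out = dictionary_of_cycle_types_alt n list_of_permutations
instance (n : Int) (list_of_permutations : List (List (List Int))) (out : List (List Int × List (List (List Int)))) : Decidable (Spec_dictionary_of_cycle_types n list_of_permutations out) := by unfold Spec_dictionary_of_cycle_types; infer_instance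

-- ===== CLAIM (what is proved, stated in full; the proofs are below) =====
def Claim_equal_dictionary_of_cycle_types : Prop := ∀ (n : Int) (list_of_permutations : List (List (List Int))), Dom_dictionary_of_cycle_types n list_of_permutations → Spec_dictionary_of_cycle_types n list_of_permutations (dictionary_of_cycle_types n list_of_permutations)

-- ===== LEMMAS AND PROOFS =====

-- A's guarded insert/append step is the unconditional modify-append step
lemma step_eq_modify (d : PySem.Dict (List Int) (List (List (List Int)))) (k : List Int) (p : List (List Int)) :
    (if d.contains k then d.modify k [] (fun l => l ++ [p]) else d.insert k [p])
      = d.modify k [] (fun l => l ++ [p]) := by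
  by_cases h : d.contains k = true
  · simp [h]
  · simp only [Bool.not_eq_true] at h
    simp [h, PySem.Dict.insert, PySem.Dict.modify,
      PySem.Dict.getD_of_not_contains d [] h]

lemma foldA_eq (n : Int) (ps : List (List (List Int))) :
    ps.foldl
      (fun (output : PySem.Dict (List Int) (List (List (List Int)))) perm =>
        if output.contains (cycleType n perm) then
          output.modify (cycleType n perm) [] (fun l => l ++ [perm])
        else
          output.insert (cycleType n perm) [perm])
      PySem.Dict.empty
    = (ps.map (fun p => (cycleType n p, p))).foldl
        (fun d q => d.modify q.1 [] (fun l => l ++ [q.2])) PySem.Dict.empty := by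
  rw [List.foldl_map]
  simp only [step_eq_modify]

-- ===== VERDICT (by name: the statement is the Claim_ definition above) =====
theorem dictionary_of_cycle_types_spec : Claim_equal_dictionary_of_cycle_types := by
  intro n ps _
  unfold Spec_dictionary_of_cycle_types dictionary_of_cycle_types dictionary_of_cycle_types_alt
  rw [foldA_eq]
  set keyed := ps.map (fun p => (cycleType n p, p)) with hk
  set D := keyed.foldl (fun (d : PySem.Dict (List Int) (List (List (List Int)))) q => d.modify q.1 [] (fun l => l ++ [q.2])) PySem.Dict.empty with hD
  have hnodup : D.keys.Nodup := by
    rw [hD]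
    exact PySem.Dict.nodup_keys_foldl_modify_key keyed (·.1) [] (fun _ q l => l ++ [q.2]) PySem.Dict.empty (by simp)
  have hkeys : D.keys = PySem.List.dedup (keyed.map (·.1)) := by
    rw [hD, PySem.Dict.keys_foldl_modify_key]
    simp [PySem.Set.update_nil_left]
  rw [PySem.Dict.items_eq_map_keys D hnodup [], hkeys]
  apply List.map_congr_left
  intro k _
  rw [hD, PySem.Dict.getD_foldl_modify_append]
  simp
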